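-- pv_equiv track=rewrite | github.com/guillsil/Algo1Essaya-Python | rpl/Recursion/Recursion-eje-10.py | tiene_mas_letra_a
-- ===== SOURCE A (Python) =====
-- def tiene_mas_letra_a(cadena):
--     '''
--     Devuelve True si en la cadena hay más letras A que letras E, False en caso contrario.
--     '''
--     if len(cadena) == 0:
--         return 0
--     else:
--         if cadena[0] == 'a' or cadena[0] == 'A':
--             return 1 + tiene_mas_letra_a(cadena[1:])
--         elif cadena[0] == 'e' or cadena[0] == 'E':
--             return -1 + tiene_mas_letra_a(cadena[1:])
--         else:
--             return tiene_mas_letra_a(cadena[1:])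
-- ===== SOURCE B (Python) =====
-- def tiene_mas_letra_a(cadena):
--     total = 0
--     for c in cadena:
--         if c in ('a', 'A'):
--             total += 1
--         elif c in ('e', 'E'):
--             total -= 1
--     return total
-- ===== Notes on version B (the rewrite author's own statement) =====
-- stated objective: simpler
-- what changed: Replaced the recursion over successive string slices with a single flat iterative loop over the characters keeping an integer accumulator.
import Mathlib
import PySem

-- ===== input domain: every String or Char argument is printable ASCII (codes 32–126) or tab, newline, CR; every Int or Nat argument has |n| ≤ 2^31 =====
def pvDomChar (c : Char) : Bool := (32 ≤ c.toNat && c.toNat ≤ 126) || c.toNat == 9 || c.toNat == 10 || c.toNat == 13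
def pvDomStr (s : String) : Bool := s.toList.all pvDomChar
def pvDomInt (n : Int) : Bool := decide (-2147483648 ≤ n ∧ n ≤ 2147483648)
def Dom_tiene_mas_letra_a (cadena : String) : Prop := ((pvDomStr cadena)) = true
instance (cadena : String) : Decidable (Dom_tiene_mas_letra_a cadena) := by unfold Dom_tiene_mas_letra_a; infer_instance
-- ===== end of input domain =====

-- B replaces A's slice-by-slice recursion with one flat accumulator loop over the characters (simpler, no repeated tail copies).

-- ===== PORT A =====
-- A recurses on cadena[1:] after examining cadena[0]; ported as structural recursion on the character list.
def tieneMasLetraARec : List Char → Int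
  | [] => 0
  | c :: rest =>
    if c = 'a' ∨ c = 'A' then 1 + tieneMasLetraARec rest
    else if c = 'e' ∨ c = 'E' then -1 + tieneMasLetraARec rest
    else tieneMasLetraARec rest

def tiene_mas_letra_a (cadena : String) : Int := tieneMasLetraARec cadena.toList

-- ===== PORT B =====
-- B: total = 0; for c in cadena: ±1; return total — a foldl over the characters.
def tiene_mas_letra_a_alt (cadena : String) : Int :=
  cadena.toList.foldl
    (fun total c =>
      if c = 'a' ∨ c = 'A' then total + 1
      else if c = 'e' ∨ c = 'E' then total - 1
      else total) 0

-- ===== PRECONDITION & SPEC =====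
def Spec_tiene_mas_letra_a (cadena : String) (out : Int) : Prop := out = tiene_mas_letra_a_alt cadena
instance (cadena : String) (out : Int) : Decidable (Spec_tiene_mas_letra_a cadena out) := by unfold Spec_tiene_mas_letra_a; infer_instance

-- ===== CLAIM (what is proved, stated in full; the proofs are below) =====
def Claim_equal_tiene_mas_letra_a : Prop := ∀ (cadena : String), Dom_tiene_mas_letra_a cadena → Spec_tiene_mas_letra_a cadena (tiene_mas_letra_a cadena)

-- ===== LEMMAS AND PROOFS =====
theorem foldl_eq_rec (l : List Char) (t : Int) :
    l.foldl
      (fun total c =>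
        if c = 'a' ∨ c = 'A' then total + 1
        else if c = 'e' ∨ c = 'E' then total - 1
        else total) t = t + tieneMasLetraARec l := by
  induction l generalizing t with
  | nil => simp [tieneMasLetraARec]
  | cons c rest ih =>
    simp only [List.foldl, tieneMasLetraARec]
    split_ifs <;> rw [ih] <;> ring

-- ===== VERDICT (by name: the statement is the Claim_ definition above) =====
theorem tiene_mas_letra_a_spec : Claim_equal_tiene_mas_letra_a := by
  intro cadena _
  unfold Spec_tiene_mas_letra_a tiene_mas_letra_a tiene_mas_letra_a_alt
  rw [foldl_eq_rec]
  ring
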